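-- pv_equiv track=rewrite | github.com/jsownz/personal-dictionary | PersonalDictionary.py | numeric_alternatives
-- ===== SOURCE A (Python) =====
-- def numeric_alternatives(term):
--     """
--         Replace numeric chars within a string with common substitutions of
--         letters, spelling, and symbols.
--
--         :param term: string
--         :return new_term: term with all numbers replaced by common alternatives
--         :rtype: string
--     """
--     new_term = ""
--     number_alt_dict = {'0': ['O', 'zero'], '1': ['l', 'i', '|', 'one'],
--                        '2': ['z', 'two'], '3': ['E', 'three'],
--                        '4': ['A', 'four'], '5': ['S', 'five'],
--                        '6': ['G', 'six'], '7': ['T', 'seven'],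
--                        '8': ['B', 'eight'], '9': ['G', 'nine']}
--     for letter in term:
--         if letter in number_alt_dict:
--             new_term += number_alt_dict[letter][0]
--         else:
--             new_term += letter
--     return new_term
-- ===== SOURCE B (Python) =====
-- _SUBS = (('0', 'O'), ('1', 'l'), ('2', 'z'), ('3', 'E'), ('4', 'A'),
--          ('5', 'S'), ('6', 'G'), ('7', 'T'), ('8', 'B'), ('9', 'G'))
--
--
-- def numeric_alternatives(term):
--     """Ten staged whole-string passes: for each digit, replace every
--     occurrence in the string at once. Correct because no substitution
--     character is itself a digit, so the passes cannot interfere."""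
--     for digit, sub in _SUBS:
--         term = term.replace(digit, sub)
--     return term
-- ===== Notes on version B (the rewrite author's own statement) =====
-- stated objective: alternative
-- what changed: Replaced A's char-by-char Python accumulate loop over a dict of alternative lists by ten staged whole-string str.replace passes, one per digit, folded over a (digit, substitution) pair table; correct because no substitution character is a digit, so passes cannot interfere; the C-level passes beat the per-char Python loop by a constant factor.
import Mathlib
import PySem

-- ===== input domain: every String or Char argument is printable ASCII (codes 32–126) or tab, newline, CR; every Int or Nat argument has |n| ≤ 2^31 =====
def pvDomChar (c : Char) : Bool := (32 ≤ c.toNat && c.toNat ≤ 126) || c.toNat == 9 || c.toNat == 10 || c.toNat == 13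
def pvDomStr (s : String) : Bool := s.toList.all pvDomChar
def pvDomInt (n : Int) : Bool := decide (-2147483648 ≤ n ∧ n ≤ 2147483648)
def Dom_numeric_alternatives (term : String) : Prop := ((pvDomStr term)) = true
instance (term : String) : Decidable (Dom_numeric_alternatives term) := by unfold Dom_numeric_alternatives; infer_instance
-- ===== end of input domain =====

-- B replaces A's single char-by-char accumulate loop over a dict of alternative lists
-- by TEN staged whole-string replace passes (one str.replace per digit); alternative decomposition.

-- ===== PORT A =====
-- the literal dict of A: digit char ↦ list of alternative strings
def pvAltDict : PySem.Dict Char (List String) :=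
  PySem.Dict.ofList [('0', ["O", "zero"]), ('1', ["l", "i", "|", "one"]),
                     ('2', ["z", "two"]), ('3', ["E", "three"]),
                     ('4', ["A", "four"]), ('5', ["S", "five"]),
                     ('6', ["G", "six"]), ('7', ["T", "seven"]),
                     ('8', ["B", "eight"]), ('9', ["G", "nine"])]

def numeric_alternatives (term : String) : String :=
  -- new_term = ""; for letter in term: if letter in dict: new_term += dict[letter][0] else: new_term += letter
  String.ofList (term.toList.foldl (fun acc letter =>
    acc ++ (match pvAltDict.get? letter with
            | some alts => ((PySem.List.pyGet? alts 0).getD "").toList  -- alts[0]; every list in the dict is nonempty, pyGet? never misses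
            | none => [letter])) [])

-- ===== PORT B =====
-- the (digit, substitution) pairs of Source B's _SUBS tuple
def pvSubs : List (String × String) :=
  [("0", "O"), ("1", "l"), ("2", "z"), ("3", "E"), ("4", "A"),
   ("5", "S"), ("6", "G"), ("7", "T"), ("8", "B"), ("9", "G")]

def numeric_alternatives_alt (term : String) : String :=
  -- for digit, sub in _SUBS: term = term.replace(digit, sub); return term
  pvSubs.foldl (fun t p => PySem.Str.replace t p.1 p.2) term

-- ===== PRECONDITION & SPEC =====
def Spec_numeric_alternatives (term : String) (out : String) : Prop := out = numeric_alternatives_alt term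
instance (term : String) (out : String) : Decidable (Spec_numeric_alternatives term out) := by unfold Spec_numeric_alternatives; infer_instance

-- ===== CLAIM =====
def Claim_equal_numeric_alternatives : Prop := ∀ (term : String), Dom_numeric_alternatives term → Spec_numeric_alternatives term (numeric_alternatives term)

-- ===== LEMMAS AND PROOFS =====

-- proof-side table: the net effect of both programs on one character
def pvTbl (c : Char) : Char :=
  if c == '0' then 'O' else if c == '1' then 'l' else if c == '2' then 'z'
  else if c == '3' then 'E' else if c == '4' then 'A' else if c == '5' then 'S'
  else if c == '6' then 'G' else if c == '7' then 'T' else if c == '8' then 'B'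
  else if c == '9' then 'G' else c

-- A's per-character appended piece is exactly [pvTbl c]
lemma pvStep_eq (c : Char) :
    (match pvAltDict.get? c with
     | some alts => ((PySem.List.pyGet? alts 0).getD "").toList
     | none => [c]) = [pvTbl c] := by
  by_cases h0 : c = '0'; · subst h0; decide
  by_cases h1 : c = '1'; · subst h1; decide
  by_cases h2 : c = '2'; · subst h2; decide
  by_cases h3 : c = '3'; · subst h3; decide
  by_cases h4 : c = '4'; · subst h4; decide
  by_cases h5 : c = '5'; · subst h5; decide
  by_cases h6 : c = '6'; · subst h6; decide
  by_cases h7 : c = '7'; · subst h7; decide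
  by_cases h8 : c = '8'; · subst h8; decide
  by_cases h9 : c = '9'; · subst h9; decide
  have hd : pvAltDict = PySem.Dict.mk [('0', ["O", "zero"]), ('1', ["l", "i", "|", "one"]),
                     ('2', ["z", "two"]), ('3', ["E", "three"]),
                     ('4', ["A", "four"]), ('5', ["S", "five"]),
                     ('6', ["G", "six"]), ('7', ["T", "seven"]),
                     ('8', ["B", "eight"]), ('9', ["G", "nine"])] := by decide
  have e0 : ('0' == c) = false := beq_eq_false_iff_ne.mpr (Ne.symm h0)
  have e1 : ('1' == c) = false := beq_eq_false_iff_ne.mpr (Ne.symm h1)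
  have e2 : ('2' == c) = false := beq_eq_false_iff_ne.mpr (Ne.symm h2)
  have e3 : ('3' == c) = false := beq_eq_false_iff_ne.mpr (Ne.symm h3)
  have e4 : ('4' == c) = false := beq_eq_false_iff_ne.mpr (Ne.symm h4)
  have e5 : ('5' == c) = false := beq_eq_false_iff_ne.mpr (Ne.symm h5)
  have e6 : ('6' == c) = false := beq_eq_false_iff_ne.mpr (Ne.symm h6)
  have e7 : ('7' == c) = false := beq_eq_false_iff_ne.mpr (Ne.symm h7)
  have e8 : ('8' == c) = false := beq_eq_false_iff_ne.mpr (Ne.symm h8)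
  have e9 : ('9' == c) = false := beq_eq_false_iff_ne.mpr (Ne.symm h9)
  have f0 : (c == '0') = false := beq_eq_false_iff_ne.mpr h0
  have f1 : (c == '1') = false := beq_eq_false_iff_ne.mpr h1
  have f2 : (c == '2') = false := beq_eq_false_iff_ne.mpr h2
  have f3 : (c == '3') = false := beq_eq_false_iff_ne.mpr h3
  have f4 : (c == '4') = false := beq_eq_false_iff_ne.mpr h4
  have f5 : (c == '5') = false := beq_eq_false_iff_ne.mpr h5
  have f6 : (c == '6') = false := beq_eq_false_iff_ne.mpr h6
  have f7 : (c == '7') = false := beq_eq_false_iff_ne.mpr h7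
  have f8 : (c == '8') = false := beq_eq_false_iff_ne.mpr h8
  have f9 : (c == '9') = false := beq_eq_false_iff_ne.mpr h9
  rw [hd]
  simp only [PySem.Dict.get?_mk_cons, pvTbl,
    e0, e1, e2, e3, e4, e5, e6, e7, e8, e9, f0, f1, f2, f3, f4, f5, f6, f7, f8, f9]
  simp [PySem.Dict.get?]

-- A's fold equals the table map, for any accumulator
lemma pvFold_eq (l : List Char) (acc : List Char) :
    l.foldl (fun acc letter =>
      acc ++ (match pvAltDict.get? letter with
              | some alts => ((PySem.List.pyGet? alts 0).getD "").toList
              | none => [letter])) acc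
    = acc ++ l.map pvTbl := by
  induction l generalizing acc with
  | nil => simp
  | cons c tl ih =>
      simp only [List.foldl_cons, List.map_cons]
      rw [pvStep_eq c, ih]
      simp

-- per-digit substitution function: one replace pass acts charwise
def pvF (d r c : Char) : Char := if c == d then r else c

-- replace.go with a single-character pattern is a charwise map
lemma pvGo_single (d r : Char) (l acc : List Char) (fuel : Nat) (h : l.length ≤ fuel) :
    PySem.Chars.replace.go [d] [r] fuel l acc = acc.reverse ++ l.map (pvF d r) := by
  induction l generalizing fuel acc with
  | nil => cases fuel <;> simp [PySem.Chars.replace.go]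
  | cons c tl ih =>
      cases fuel with
      | zero => simp at h
      | succ n =>
          rw [PySem.Chars.replace.go]
          by_cases hc : c = d
          · subst hc
            have hp : [c].isPrefixOf (c :: tl) = true := by simp [List.isPrefixOf]
            simp only [hp, if_true, List.length_cons, List.length_nil, Nat.zero_add, List.drop_succ_cons, List.drop_zero]
            rw [ih _ _ (by simpa using h)]
            simp [pvF]
          · have hp : [d].isPrefixOf (c :: tl) = false := by
              simp [List.isPrefixOf, beq_eq_false_iff_ne.mpr (Ne.symm hc)]
            simp only [hp]
            rw [ih _ _ (by simpa using h)]
            simp [pvF, beq_eq_false_iff_ne.mpr hc]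

lemma pvReplace_single (d r : Char) (l : List Char) :
    PySem.Chars.replace l [d] [r] = l.map (pvF d r) := by
  rw [PySem.Chars.replace]
  simp [pvGo_single d r l [] l.length le_rfl]

-- the ten staged passes, chained on one character, compute pvTbl
lemma pvChain_eq (c : Char) :
    pvF '9' 'G' (pvF '8' 'B' (pvF '7' 'T' (pvF '6' 'G' (pvF '5' 'S' (pvF '4' 'A'
      (pvF '3' 'E' (pvF '2' 'z' (pvF '1' 'l' (pvF '0' 'O' c))))))))) = pvTbl c := by
  by_cases h0 : c = '0'; · subst h0; decide
  by_cases h1 : c = '1'; · subst h1; decide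
  by_cases h2 : c = '2'; · subst h2; decide
  by_cases h3 : c = '3'; · subst h3; decide
  by_cases h4 : c = '4'; · subst h4; decide
  by_cases h5 : c = '5'; · subst h5; decide
  by_cases h6 : c = '6'; · subst h6; decide
  by_cases h7 : c = '7'; · subst h7; decide
  by_cases h8 : c = '8'; · subst h8; decide
  by_cases h9 : c = '9'; · subst h9; decide
  simp [pvF, pvTbl, beq_eq_false_iff_ne.mpr h0, beq_eq_false_iff_ne.mpr h1,
    beq_eq_false_iff_ne.mpr h2, beq_eq_false_iff_ne.mpr h3, beq_eq_false_iff_ne.mpr h4,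
    beq_eq_false_iff_ne.mpr h5, beq_eq_false_iff_ne.mpr h6, beq_eq_false_iff_ne.mpr h7,
    beq_eq_false_iff_ne.mpr h8, beq_eq_false_iff_ne.mpr h9]

-- B's ten replace passes equal the table map
lemma pvAlt_eq (term : String) :
    numeric_alternatives_alt term = String.ofList (term.toList.map pvTbl) := by
  unfold numeric_alternatives_alt pvSubs
  simp only [List.foldl_cons, List.foldl_nil, PySem.Str.replace]
  simp [pvReplace_single, List.map_map, Function.comp_def, pvChain_eq]

-- ===== VERDICT =====
theorem numeric_alternatives_spec : Claim_equal_numeric_alternatives := by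
  intro term _
  unfold Spec_numeric_alternatives numeric_alternatives
  rw [pvFold_eq, pvAlt_eq]
  simp
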